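-- pv_equiv track=rewrite | github.com/zortenburger/MIMUW | 5.SEM/BSK/zad4/bs.py | check
-- ===== SOURCE A (Python) =====
-- def check(s):
--     for i in range(1, len(s)-1):
--         before = s[:i]
--         after = s[i+1:]
--         if min(before) < s[i] and min(after) < s[i]:
--             return False
--         if max(before) > s[i] and max(after) > s[i]:
--             return False
--     return True
-- ===== SOURCE B (Python) =====
-- def check(s):
--     n = len(s)
--     if n < 3:
--         return True
--     pre_min = [s[0]] * n
--     pre_max = [s[0]] * n
--     for j in range(1, n):
--         pre_min[j] = min(pre_min[j - 1], s[j])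
--         pre_max[j] = max(pre_max[j - 1], s[j])
--     suf_min = [s[n - 1]] * n
--     suf_max = [s[n - 1]] * n
--     for j in range(n - 2, -1, -1):
--         suf_min[j] = min(suf_min[j + 1], s[j])
--         suf_max[j] = max(suf_max[j + 1], s[j])
--     for i in range(1, n - 1):
--         if pre_min[i - 1] < s[i] and suf_min[i + 1] < s[i]:
--             return False
--         if pre_max[i - 1] > s[i] and suf_max[i + 1] > s[i]:
--             return False
--     return True
-- ===== Notes on version B (the rewrite author's own statement) =====
-- stated objective: faster
-- what changed: B precomputes prefix and suffix running min/max arrays in two linear passes and checks each interior index with O(1) array lookups, instead of A's per-index min/max scans over both slices.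
import Mathlib
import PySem

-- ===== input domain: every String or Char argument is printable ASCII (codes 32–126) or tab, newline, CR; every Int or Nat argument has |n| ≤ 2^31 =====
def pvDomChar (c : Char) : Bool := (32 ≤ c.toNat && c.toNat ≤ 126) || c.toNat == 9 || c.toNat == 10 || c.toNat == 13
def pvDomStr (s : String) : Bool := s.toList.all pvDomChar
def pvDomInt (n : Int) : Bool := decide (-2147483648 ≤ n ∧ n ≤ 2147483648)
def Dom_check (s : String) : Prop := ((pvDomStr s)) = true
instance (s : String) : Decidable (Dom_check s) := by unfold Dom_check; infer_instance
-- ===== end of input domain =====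

-- B replaces A's per-index O(n) min/max over both slices by precomputed prefix and
-- suffix min/max arrays (O(n) total vs O(n^2)); same Boolean result.

-- ===== PORT A =====
-- A's loop with early return: recursion over the index list.  The 'a' defaults of
-- min?/max?/pyGetD are unreachable (for i in range(1, len-1) both slices are nonempty
-- and the index is in range), so they never affect the value.
def checkA_loop (cs : List Char) : List Int → Bool
  | [] => true
  | i :: rest =>
    let before := PySem.List.slice cs none (some i)
    let after := PySem.List.slice cs (some (i + 1)) none
    let si := PySem.List.pyGetD cs i 'a'
    if ((PySem.List.min? before (fun x => x)).getD si < si)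
        && ((PySem.List.min? after (fun x => x)).getD si < si) then false
    else if (si < (PySem.List.max? before (fun x => x)).getD si)
        && (si < (PySem.List.max? after (fun x => x)).getD si) then false
    else checkA_loop cs rest

def check (s : String) : Bool :=
  let cs := s.toList
  checkA_loop cs (PySem.List.pyRange 1 ((cs.length : Int) - 1) 1)

-- ===== PORT B =====
-- the running-min/max loop appending to pre_min/pre_max (state: current m, M and the two lists)
def buildPre (m M : Char) (accMin accMax : List Char) : List Char → List Char × List Char
  | [] => (accMin, accMax)
  | c :: t => buildPre (min m c) (max M c) (accMin ++ [min m c]) (accMax ++ [max M c]) t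

-- B's final loop with early return, array lookups instead of slice scans
def checkB_loop (cs preMin preMax sufMin sufMax : List Char) : List Int → Bool
  | [] => true
  | i :: rest =>
    let si := PySem.List.pyGetD cs i 'a'
    if (PySem.List.pyGetD preMin (i - 1) 'a' < si)
        && (PySem.List.pyGetD sufMin (i + 1) 'a' < si) then false
    else if (si < PySem.List.pyGetD preMax (i - 1) 'a')
        && (si < PySem.List.pyGetD sufMax (i + 1) 'a') then false
    else checkB_loop cs preMin preMax sufMin sufMax rest

def check_alt (s : String) : Bool :=
  let cs := s.toList
  let n : Int := cs.length
  if n < 3 then true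
  else
    let c0 := PySem.List.pyGetD cs 0 'a'          -- s[0]
    let cl := PySem.List.pyGetD cs (-1) 'a'       -- s[-1]
    let pre := buildPre c0 c0 [c0] [c0] (PySem.List.slice cs (some 1) none)              -- s[1:]
    let suf := buildPre cl cl [cl] [cl] ((PySem.List.slice cs none (some (-1))).reverse) -- reversed(s[:-1])
    checkB_loop cs pre.1 pre.2 suf.1.reverse suf.2.reverse (PySem.List.pyRange 1 (n - 1) 1)

-- ===== PRECONDITION & SPEC =====
def Spec_check (s : String) (out : Bool) : Prop := out = check_alt s
instance (s : String) (out : Bool) : Decidable (Spec_check s out) := by unfold Spec_check; infer_instance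

-- ===== CLAIM (what is proved, stated in full; the proofs are below) =====
def Claim_equal_check : Prop := ∀ (s : String), Dom_check s → Spec_check s (check s)

-- ===== LEMMAS AND PROOFS =====

-- the list of running f-accumulations over a list (what pre_min/pre_max hold past s[0])
def scanF (f : Char → Char → Char) (a : Char) : List Char → List Char
  | [] => []
  | c :: t => f a c :: scanF f (f a c) t

theorem length_scanF (f : Char → Char → Char) (a : Char) (t : List Char) :
    (scanF f a t).length = t.length := by
  induction t generalizing a with
  | nil => rfl
  | cons c t ih => simp [scanF, ih]

theorem buildPre_spec (l : List Char) : ∀ (m M : Char) (xs ys : List Char),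
    buildPre m M xs ys l = (xs ++ scanF min m l, ys ++ scanF max M l) := by
  induction l with
  | nil => intro m M xs ys; simp [buildPre, scanF]
  | cons c t ih => intro m M xs ys; simp [buildPre, scanF, ih]

theorem scanF_getElem? (f : Char → Char → Char) (t : List Char) :
    ∀ (a : Char) (k : Nat), k ≤ t.length →
    (a :: scanF f a t)[k]? = some ((t.take k).foldl f a) := by
  induction t with
  | nil =>
    intro a k hk
    have hk0 : k = 0 := by simpa using hk
    subst hk0
    simp [scanF]
  | cons c t ih =>
    intro a k hk
    cases k with
    | zero => simp
    | succ k =>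
      have := ih (f a c) k (by simpa using hk)
      simpa [scanF, List.take_succ_cons] using this

theorem foldl_pull (f : Char → Char → Char)
    (hA : ∀ a b c, f (f a b) c = f a (f b c)) (hC : ∀ a b, f a b = f b a) :
    ∀ (l : List Char) (a x : Char), l.foldl f (f a x) = f (l.foldl f a) x := by
  intro l
  induction l with
  | nil => intro a x; rfl
  | cons c t ih =>
    intro a x
    simp only [List.foldl_cons]
    rw [hA, hC x c, ← hA, ih]

theorem foldl_reverse_comm (f : Char → Char → Char)
    (hA : ∀ a b c, f (f a b) c = f a (f b c)) (hC : ∀ a b, f a b = f b a) :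
    ∀ (l : List Char) (a : Char), l.reverse.foldl f a = l.foldl f a := by
  intro l
  induction l with
  | nil => intro a; rfl
  | cons c t ih =>
    intro a
    simp only [List.reverse_cons, List.foldl_append, List.foldl_cons, List.foldl_nil, ih]
    rw [← foldl_pull f hA hC]

-- ----- the "before" slice: min/max of s[:i] equals the prefix-array entry -----

theorem before_min_eq (c0 : Char) (t : List Char) (i : Int) (d : Char)
    (h1 : 1 ≤ i) (h2 : i < ((c0 :: t).length : Int) - 1) :
    (PySem.List.min? (PySem.List.slice (c0 :: t) none (some i)) (fun x => x)).getD d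
      = PySem.List.pyGetD (c0 :: scanF min c0 t) (i - 1) 'a' := by
  have h0 : (0 : Int) ≤ i := by omega
  have hk1 : 1 ≤ i.toNat := by omega
  have hkt : i.toNat - 1 ≤ t.length := by simp at h2; omega
  rw [PySem.List.slice_to _ h0]
  have htake : (c0 :: t).take i.toNat = c0 :: t.take (i.toNat - 1) := by
    obtain ⟨k, hk⟩ : ∃ k, i.toNat = k + 1 := ⟨i.toNat - 1, by omega⟩
    simp [hk]
  rw [htake, PySem.List.min?_id_cons]
  rw [PySem.List.pyGetD_eq_getElem _ _ (by omega)
        (by simp [length_scanF]; omega)]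
  have hidx : (i - 1).toNat = i.toNat - 1 := by omega
  simp only [hidx]
  have := scanF_getElem? min t c0 (i.toNat - 1) hkt
  simp only [List.getElem?_eq_getElem (by simp [length_scanF]; omega : i.toNat - 1 < (c0 :: scanF min c0 t).length)] at this
  simp_all

theorem before_max_eq (c0 : Char) (t : List Char) (i : Int) (d : Char)
    (h1 : 1 ≤ i) (h2 : i < ((c0 :: t).length : Int) - 1) :
    (PySem.List.max? (PySem.List.slice (c0 :: t) none (some i)) (fun x => x)).getD d
      = PySem.List.pyGetD (c0 :: scanF max c0 t) (i - 1) 'a' := by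
  have h0 : (0 : Int) ≤ i := by omega
  have hk1 : 1 ≤ i.toNat := by omega
  have hkt : i.toNat - 1 ≤ t.length := by simp at h2; omega
  rw [PySem.List.slice_to _ h0]
  have htake : (c0 :: t).take i.toNat = c0 :: t.take (i.toNat - 1) := by
    obtain ⟨k, hk⟩ : ∃ k, i.toNat = k + 1 := ⟨i.toNat - 1, by omega⟩
    simp [hk]
  rw [htake, PySem.List.max?_id_cons]
  rw [PySem.List.pyGetD_eq_getElem _ _ (by omega)
        (by simp [length_scanF]; omega)]
  have hidx : (i - 1).toNat = i.toNat - 1 := by omega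
  simp only [hidx]
  have := scanF_getElem? max t c0 (i.toNat - 1) hkt
  simp only [List.getElem?_eq_getElem (by simp [length_scanF]; omega : i.toNat - 1 < (c0 :: scanF max c0 t).length)] at this
  simp_all

-- ----- the "after" slice: min/max of s[i+1:] equals the suffix-array entry -----

-- generic over f (used with f = min and f = max)
theorem after_eq (f : Char → Char → Char)
    (hA : ∀ a b c, f (f a b) c = f a (f b c)) (hC : ∀ a b, f a b = f b a)
    (sel : List Char → (Char → Char) → Option Char)
    (hsel : ∀ (x : Char) (t : List Char), sel (x :: t) (fun y => y) = some (t.foldl f x))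
    (cs : List Char) (hne : cs ≠ []) (i : Int) (d : Char)
    (h1 : 1 ≤ i) (h2 : i < (cs.length : Int) - 1) :
    (sel (PySem.List.slice cs (some (i + 1)) none) (fun x => x)).getD d
      = PySem.List.pyGetD
          ((cs.getLast hne :: scanF f (cs.getLast hne) cs.dropLast.reverse).reverse)
          (i + 1) 'a' := by
  have hlen : 3 ≤ cs.length := by omega
  set b0 := cs.getLast hne with hb0
  set d0 := cs.dropLast with hd0
  have hd0len : d0.length = cs.length - 1 := by simp [hd0]
  have hsplit : cs = d0 ++ [b0] := (List.dropLast_concat_getLast hne).symm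
  have h0 : (0 : Int) ≤ i + 1 := by omega
  have hk : (i + 1).toNat = i.toNat + 1 := by omega
  have hklt : i.toNat + 1 ≤ d0.length := by omega
  -- LHS: drop, split at the last element
  rw [PySem.List.slice_from _ h0, hk]
  have hdrop : cs.drop (i.toNat + 1) = d0.drop (i.toNat + 1) ++ [b0] := by
    conv_lhs => rw [hsplit]
    rw [List.drop_append_of_le_length hklt]
  rw [hdrop]
  -- RHS: index into the reversed scan list
  have hlenL : (b0 :: scanF f b0 d0.reverse).length = cs.length := by
    simp only [List.length_cons, length_scanF, List.length_reverse]
    omega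
  have hIdx : (i + 1) < (((b0 :: scanF f b0 d0.reverse).reverse).length : Int) := by
    rw [List.length_reverse, hlenL]; omega
  rw [PySem.List.pyGetD_eq_getElem _ _ h0 hIdx]
  have hjlt : (i + 1).toNat < (b0 :: scanF f b0 d0.reverse).reverse.length := by
    rw [List.length_reverse, hlenL]; omega
  have hrev : (b0 :: scanF f b0 d0.reverse).reverse[(i + 1).toNat] =
      ((d0.drop (i.toNat + 1)).reverse).foldl f b0 := by
    have hge : (b0 :: scanF f b0 d0.reverse).reverse[(i + 1).toNat]? =
        (b0 :: scanF f b0 d0.reverse)[(b0 :: scanF f b0 d0.reverse).length - 1 - (i + 1).toNat]? :=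
      List.getElem?_reverse (by simpa using hjlt)
    have hm : (b0 :: scanF f b0 d0.reverse).length - 1 - (i + 1).toNat
        = d0.length - (i.toNat + 1) := by
      simp only [List.length_cons, length_scanF, List.length_reverse]
      omega
    rw [hm] at hge
    have hscan := scanF_getElem? f d0.reverse b0 (d0.length - (i.toNat + 1)) (by simp)
    have htk : d0.reverse.take (d0.length - (i.toNat + 1))
        = (d0.drop (d0.length - (d0.length - (i.toNat + 1)))).reverse := List.take_reverse
    have hdd : d0.length - (d0.length - (i.toNat + 1)) = i.toNat + 1 := by omega
    rw [htk, hdd] at hscan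
    rw [hscan, List.getElem?_eq_getElem hjlt] at hge
    exact Option.some.inj hge
  rw [hrev, foldl_reverse_comm f hA hC]
  -- now both sides are folds over d0.drop (i.toNat+1), one with b0 appended vs b0 as seed
  cases hu : d0.drop (i.toNat + 1) with
  | nil => simp [hsel]
  | cons h tl =>
    rw [List.cons_append, hsel]
    simp only [Option.getD_some, List.foldl_cons, List.foldl_append, List.foldl_nil]
    rw [hC b0 h, foldl_pull f hA hC]

-- ----- the two loops agree index by index -----

theorem loops_eq (c0 : Char) (t : List Char) (_h3 : 3 ≤ (c0 :: t).length) :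
    ∀ L : List Int, (∀ i ∈ L, 1 ≤ i ∧ i < (((c0 :: t).length : Int) - 1)) →
    checkA_loop (c0 :: t) L =
      checkB_loop (c0 :: t) (c0 :: scanF min c0 t) (c0 :: scanF max c0 t)
        (((c0 :: t).getLast (by simp) :: scanF min ((c0 :: t).getLast (by simp)) (c0 :: t).dropLast.reverse).reverse)
        (((c0 :: t).getLast (by simp) :: scanF max ((c0 :: t).getLast (by simp)) (c0 :: t).dropLast.reverse).reverse)
        L := by
  intro L hL
  induction L with
  | nil => rfl
  | cons i rest ih =>
    obtain ⟨h1, h2⟩ := hL i (by simp)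
    have hrest : ∀ j ∈ rest, 1 ≤ j ∧ j < (((c0 :: t).length : Int) - 1) := by
      intro j hj; exact hL j (by simp [hj])
    rw [checkA_loop, checkB_loop]
    rw [before_min_eq c0 t i _ h1 h2, before_max_eq c0 t i _ h1 h2,
        after_eq min min_assoc min_comm PySem.List.min? PySem.List.min?_id_cons (c0 :: t) (by simp) i _ h1 h2,
        after_eq max max_assoc max_comm PySem.List.max? PySem.List.max?_id_cons (c0 :: t) (by simp) i _ h1 h2,
        ih hrest]

-- ===== VERDICT (by name: the statement is the Claim_ definition above) =====
theorem check_spec : Claim_equal_check := by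
  unfold Claim_equal_check
  intro s _
  simp only [Spec_check, check, check_alt]
  by_cases h : ((s.toList.length : Int)) < 3
  · rw [if_pos h, PySem.List.pyRange_one_eq_nil (by omega)]
    rfl
  · rw [if_neg h]
    have h3 : 3 ≤ s.toList.length := by omega
    obtain ⟨c0, t, hct⟩ : ∃ c0 t, s.toList = c0 :: t := by
      cases hcl : s.toList with
      | nil => rw [hcl] at h3; simp at h3
      | cons a b => exact ⟨a, b, rfl⟩
    rw [hct, PySem.List.pyGetD_zero_cons, PySem.List.pyGetD_neg_one _ 'a' (by simp),
        PySem.List.slice_from_one, PySem.List.slice_to_neg_one, buildPre_spec, buildPre_spec]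
    simp only [List.singleton_append, List.tail_cons]
    exact loops_eq c0 t (hct ▸ h3) _ (fun i hi => PySem.List.mem_pyRange_one.mp hi)
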